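-- pv_equiv track=rewrite | github.com/eb-k8s/kubeaver | backend/ansible/kubespray_process.py | remove_lines_after_pattern
-- ===== SOURCE A (Python) =====
-- def remove_lines_after_pattern(lines, pattern, num_lines_to_remove=2):
--     """
--     Remove the specified number of lines after the line containing the pattern.
--
--     :param lines: List of lines in the file.
--     :param pattern: Pattern to search for.
--     :param num_lines_to_remove: Number of lines to remove after the pattern.
--     :return: Modified list of lines.
--     """
--     new_lines = []
--     skip_count = 0
--     found_pattern = False
--
--     for line in lines:
--         if found_pattern and skip_count > 0:
--             skip_count -= 1
--             continue
--
--         if pattern in line: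
--             found_pattern = True
--             skip_count = num_lines_to_remove
--             new_lines.append(line)
--             continue
--
--         new_lines.append(line)
--
--     return new_lines
-- ===== SOURCE B (Python) =====
-- def remove_lines_after_pattern(lines, pattern, num_lines_to_remove=2):
--     """Find-and-split re-implementation: instead of walking line by line with
--     a flag+counter state machine, repeatedly search the remaining suffix for
--     the FIRST line containing the pattern, copy everything through that line
--     in one slice, cut away the max(0, n) lines after it with another slice,
--     and continue on what is left."""
--     keep_out = max(0, num_lines_to_remove)
--     out = []
--     rest = lines
--     while True:
--         hit = next((i for i, l in enumerate(rest) if pattern in l), None)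
--         if hit is None:
--             out.extend(rest)
--             return out
--         out.extend(rest[:hit + 1])
--         rest = rest[hit + 1 + keep_out:]
-- ===== Notes on version B (the rewrite author's own statement) =====
-- stated objective: alternative
-- what changed: Replaced the per-line flag+skip-counter state machine with a find-and-split loop: search the remaining suffix for the first matching line, copy through it with one slice, cut away the max(0,n) lines after it with another slice, repeat.
import Mathlib
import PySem

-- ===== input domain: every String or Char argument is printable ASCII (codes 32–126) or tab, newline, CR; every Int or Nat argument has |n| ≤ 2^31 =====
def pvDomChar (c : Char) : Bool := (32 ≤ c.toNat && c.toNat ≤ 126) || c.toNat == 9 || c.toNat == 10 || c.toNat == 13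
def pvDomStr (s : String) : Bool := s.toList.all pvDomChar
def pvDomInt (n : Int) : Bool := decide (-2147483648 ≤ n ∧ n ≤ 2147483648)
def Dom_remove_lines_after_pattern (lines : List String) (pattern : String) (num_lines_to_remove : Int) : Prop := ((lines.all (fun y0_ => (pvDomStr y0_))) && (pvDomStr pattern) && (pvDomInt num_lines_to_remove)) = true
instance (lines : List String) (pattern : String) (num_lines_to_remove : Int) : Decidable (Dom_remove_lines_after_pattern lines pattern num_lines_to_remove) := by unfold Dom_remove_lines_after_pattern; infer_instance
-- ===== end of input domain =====

-- B replaces A's per-line flag+skip-counter state machine with a find-and-split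
-- loop (search the remaining suffix for the first matching line, copy through it
-- with one slice, cut off the max(0,n) lines after it with another slice, repeat);
-- same cost, different decomposition (objective: alternative).

-- ===== PORT A =====
-- transliteration of A's for-loop: state (new_lines, skip_count, found_pattern)
def pvStepA (pattern : String) (num_lines_to_remove : Int)
    (st : List String × Int × Bool) (line : String) : List String × Int × Bool :=
  let (new_lines, skip_count, found_pattern) := st
  if found_pattern ∧ skip_count > 0 then
    (new_lines, skip_count - 1, found_pattern)
  else if PySem.Str.isIn pattern line then
    (new_lines ++ [line], num_lines_to_remove, true)
  else
    (new_lines ++ [line], skip_count, found_pattern)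

def remove_lines_after_pattern (lines : List String) (pattern : String) (num_lines_to_remove : Int) : List String :=
  (lines.foldl (pvStepA pattern num_lines_to_remove) ([], 0, false)).1

-- ===== PORT B =====
-- transliteration of B's find-and-split while loop, as recursion on `rest`:
-- find the index of the first line containing the pattern (Python's
-- `next((i for i, l in enumerate(rest) if pattern in l), None)`); if none,
-- flush `rest`; otherwise emit the slice rest[:hit+1] and continue on the
-- slice rest[hit+1+keep_out:].
def pvGoB (pattern : String) (keep_out : Nat) (rest : List String) : List String :=
  match h : rest.findIdx? (fun l => PySem.Str.isIn pattern l) with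
  | none => rest
  | some hit => rest.take (hit + 1) ++ pvGoB pattern keep_out (rest.drop (hit + 1 + keep_out))
  termination_by rest.length
  decreasing_by
    have hlt : hit < rest.length := (List.findIdx?_eq_some_iff_findIdx_eq.mp h).1
    simp only [List.length_drop]
    omega

def remove_lines_after_pattern_alt (lines : List String) (pattern : String) (num_lines_to_remove : Int) : List String :=
  pvGoB pattern (max 0 num_lines_to_remove).toNat lines

-- ===== PRECONDITION & SPEC =====
def Spec_remove_lines_after_pattern (lines : List String) (pattern : String) (num_lines_to_remove : Int) (out : List String) : Prop := out = remove_lines_after_pattern_alt lines pattern num_lines_to_remove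
instance (lines : List String) (pattern : String) (num_lines_to_remove : Int) (out : List String) : Decidable (Spec_remove_lines_after_pattern lines pattern num_lines_to_remove out) := by unfold Spec_remove_lines_after_pattern; infer_instance

-- ===== CLAIM (what is proved, stated in full; the proofs are below) =====
def Claim_equal_remove_lines_after_pattern : Prop := ∀ (lines : List String) (pattern : String) (num_lines_to_remove : Int), Dom_remove_lines_after_pattern lines pattern num_lines_to_remove → Spec_remove_lines_after_pattern lines pattern num_lines_to_remove (remove_lines_after_pattern lines pattern num_lines_to_remove)

-- ===== LEMMAS AND PROOFS =====

-- B's recursion flushes a suffix with no match …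
theorem pvGoB_none (pattern : String) (keep : Nat) (rest : List String)
    (h : rest.findIdx? (fun l => PySem.Str.isIn pattern l) = none) :
    pvGoB pattern keep rest = rest := by
  rw [pvGoB]; split
  · rfl
  · next hit h' => rw [h] at h'; cases h'

-- … and splits at the first match
theorem pvGoB_some (pattern : String) (keep : Nat) (rest : List String) (hit : Nat)
    (h : rest.findIdx? (fun l => PySem.Str.isIn pattern l) = some hit) :
    pvGoB pattern keep rest
      = rest.take (hit + 1) ++ pvGoB pattern keep (rest.drop (hit + 1 + keep)) := by
  rw [pvGoB]; split
  · next h' => rw [h] at h'; cases h'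
  · next hit' h' => rw [h] at h'; injection h' with e; subst e; rfl

-- one-step characterisation of B's find-and-split recursion on a cons cell
theorem pvGoB_cons (pattern : String) (keep : Nat) (l : String) (t : List String) :
    pvGoB pattern keep (l :: t) =
      (if PySem.Str.isIn pattern l then l :: pvGoB pattern keep (t.drop keep)
       else l :: pvGoB pattern keep t) := by
  by_cases hin : PySem.Str.isIn pattern l = true
  · rw [if_pos hin]
    have hin' : PySem.Chars.isIn pattern.toList l.toList = true := by simpa using hin
    have hfi : (l :: t).findIdx? (fun l => PySem.Str.isIn pattern l) = some 0 := by
      simp [List.findIdx?_cons, hin']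
    rw [pvGoB_some pattern keep _ 0 hfi]
    have : (0 : Nat) + 1 + keep = keep + 1 := by omega
    rw [this, List.drop_succ_cons]
    simp
  · rw [if_neg hin]
    have hb' : PySem.Chars.isIn pattern.toList l.toList = false := by simpa using hin
    cases hft : t.findIdx? (fun l => PySem.Str.isIn pattern l) with
    | none =>
      have hft'' : List.findIdx? (fun l => PySem.Chars.isIn pattern.toList l.toList) t = none := by
        simpa using hft
      have hfi : (l :: t).findIdx? (fun l => PySem.Str.isIn pattern l) = none := by
        simp [List.findIdx?_cons, hb', hft'']
      rw [pvGoB_none pattern keep _ hfi, pvGoB_none pattern keep _ hft]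
    | some i =>
      have hft'' : List.findIdx? (fun l => PySem.Chars.isIn pattern.toList l.toList) t = some i := by
        simpa using hft
      have hfi : (l :: t).findIdx? (fun l => PySem.Str.isIn pattern l) = some (i + 1) := by
        simp [List.findIdx?_cons, hb', hft'']
      rw [pvGoB_some pattern keep _ _ hfi, pvGoB_some pattern keep _ _ hft]
      have h2 : i + 1 + 1 + keep = (i + 1 + keep) + 1 := by omega
      rw [h2, List.drop_succ_cons]
      simp

-- while skip_count = (n : Nat) > 0 and found, A's loop drops lines one by one
theorem pvA_skip (pattern : String) (num : Int) (n : Nat) (ls : List String)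
    (acc : List String) :
    (ls.foldl (pvStepA pattern num) (acc, (n : Int), true)).1 =
      ((ls.drop n).foldl (pvStepA pattern num) (acc, 0, true)).1 := by
  induction n generalizing ls with
  | zero => simp
  | succ m ih =>
    cases ls with
    | nil => simp
    | cons l t =>
      have hstep : pvStepA pattern num (acc, ((m + 1 : Nat) : Int), true) l
          = (acc, (m : Int), true) := by
        simp [pvStepA]
      rw [List.foldl_cons, hstep, List.drop_succ_cons]
      exact ih t

-- main invariant: from any non-skipping state, A's loop computes acc ++ B's result
theorem pvA_eq_B (pattern : String) (num : Int) (ls : List String)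
    (acc : List String) (sk : Int) (fp : Bool) (hsk : sk ≤ 0) :
    (ls.foldl (pvStepA pattern num) (acc, sk, fp)).1
      = acc ++ pvGoB pattern (max 0 num).toNat ls := by
  induction hlen : ls.length using Nat.strong_induction_on generalizing ls acc sk fp with
  | _ n ih =>
  cases ls with
  | nil => simp [pvGoB_none pattern _ [] (by simp)]
  | cons l t =>
    by_cases hin : PySem.Str.isIn pattern l = true
    all_goals simp only [PySem.Str.isIn_eq] at hin
    · have hns : ¬(fp = true ∧ sk > 0) := by rintro ⟨_, h⟩; omega
      have hstep : pvStepA pattern num (acc, sk, fp) l = (acc ++ [l], num, true) := by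
        simp [pvStepA, hns, hin]
      by_cases hnum : num ≤ 0
      · have hdrop : (max 0 num).toNat = 0 := by omega
        have := ih t.length (by simp [← hlen]) t (acc ++ [l]) num true hnum rfl
        rw [List.foldl_cons, hstep, this]
        simp [pvGoB_cons, hin, hdrop]
      · have hskip := pvA_skip pattern num num.toNat t (acc ++ [l])
        have hcast : ((num.toNat : Nat) : Int) = num := by omega
        rw [hcast] at hskip
        have hlt : (t.drop num.toNat).length < n := by
          simp [List.length_drop, ← hlen]
        have := ih _ hlt (t.drop num.toNat) (acc ++ [l]) 0 true le_rfl rfl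
        have hdrop : (max 0 num).toNat = num.toNat := by omega
        rw [List.foldl_cons, hstep, hskip, this]
        simp [pvGoB_cons, hin, hdrop]
    · have hns : ¬(fp = true ∧ sk > 0) := by rintro ⟨_, h⟩; omega
      have hstep : pvStepA pattern num (acc, sk, fp) l = (acc ++ [l], sk, fp) := by
        simp [pvStepA, hns, hin]
      have := ih t.length (by simp [← hlen]) t (acc ++ [l]) sk fp hsk rfl
      rw [List.foldl_cons, hstep, this]
      simp [pvGoB_cons, hin]

-- ===== VERDICT (by name: the statement is the Claim_ definition above) =====
theorem remove_lines_after_pattern_spec : Claim_equal_remove_lines_after_pattern := by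
  intro lines pattern num _
  unfold Spec_remove_lines_after_pattern remove_lines_after_pattern remove_lines_after_pattern_alt
  simpa using pvA_eq_B pattern num lines [] 0 false le_rfl
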